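-- pv_equiv track=rewrite | github.com/ChinmayBhide154/Routing | src/distancevector.py | get_complete_paths
-- ===== SOURCE A (Python) =====
-- def get_complete_paths(distance_vectors, next_hops):
--     output = []
--     for src_router in sorted(distance_vectors.keys()):
--         for dst_router in sorted(distance_vectors[src_router].keys()):
--             if src_router == dst_router:
--                 continue
--             path = [src_router]
--             next_router = src_router
--             while next_router != dst_router:
--                 next_router = next_hops[next_router].get(dst_router)
--                 if next_router is None:
--                     break
--                 path.append(next_router)
--             if next_router is not None:
--                 cost = distance_vectors[src_router][dst_router]
--                 path_str = ' -> '.join(map(str, path))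
--                 output.append(f"from {src_router} to {dst_router} cost {cost} hops {path_str}")
--     return '\n'.join(output)
-- ===== SOURCE B (Python) =====
-- def get_complete_paths(distance_vectors, next_hops):
--     # Pipeline: enumerate ordered (src, dst) pairs, build each path by naive
--     # recursion on the next-hop table, then render and join the found ones.
--     def path_to(node, dst):
--         if node == dst:
--             return [node]
--         nxt = next_hops[node].get(dst)
--         if nxt is None:
--             return None
--         tail = path_to(nxt, dst)
--         return None if tail is None else [node] + tail
--
--     pairs = [(s, d)
--              for s in sorted(distance_vectors)
--              for d in sorted(distance_vectors[s])
--              if s != d]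
--     paths = [(s, d, path_to(s, d)) for s, d in pairs]
--     return '\n'.join(
--         f"from {s} to {d} cost {distance_vectors[s][d]} hops {' -> '.join(p)}"
--         for s, d, p in paths if p is not None)
-- ===== Notes on version B (the rewrite author's own statement) =====
-- stated objective: alternative
-- what changed: Replaces A's nested loops with an in-place while-loop retrace by a staged pipeline: a comprehension enumerates the ordered (src, dst) pairs, each path is built head-first by naive recursion on the next-hop table, and the found ones are rendered and joined in one final pass.
import Mathlib
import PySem

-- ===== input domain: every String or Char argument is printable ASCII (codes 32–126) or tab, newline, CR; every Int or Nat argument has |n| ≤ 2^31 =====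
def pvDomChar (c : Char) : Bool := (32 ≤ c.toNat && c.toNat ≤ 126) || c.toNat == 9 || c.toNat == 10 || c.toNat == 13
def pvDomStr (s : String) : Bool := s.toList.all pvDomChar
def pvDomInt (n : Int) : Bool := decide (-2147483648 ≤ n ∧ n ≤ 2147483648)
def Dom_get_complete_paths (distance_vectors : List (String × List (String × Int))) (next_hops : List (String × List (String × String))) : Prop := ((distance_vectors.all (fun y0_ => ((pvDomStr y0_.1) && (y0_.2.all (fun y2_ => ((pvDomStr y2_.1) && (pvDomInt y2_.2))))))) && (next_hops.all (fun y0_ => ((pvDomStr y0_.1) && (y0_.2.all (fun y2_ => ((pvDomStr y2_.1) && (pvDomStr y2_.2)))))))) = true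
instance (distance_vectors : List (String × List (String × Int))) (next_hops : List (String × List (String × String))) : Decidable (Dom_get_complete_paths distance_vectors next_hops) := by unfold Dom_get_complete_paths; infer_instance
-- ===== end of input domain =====

-- B replaces A's nested loops with a while-loop retrace by a staged pipeline (pair
-- enumeration, recursive head-first path builder, render-and-join); objective: alternative.

-- ===== PORT A =====
-- the while loop of A: chase next_hops toward dst, appending to the path accumulator.
-- outer none = Python raises (KeyError) or loops forever (fuel; next_hops.length+2 bounds every
-- terminating chain, whose chased nodes are distinct keys of next_hops); inner none = break on None.
def pvTraceA (nh : List (String × List (String × String))) (dst : String) :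
    Nat → String → List String → Option (Option (List String))
  | 0, _, _ => none
  | fuel+1, cur, path =>
    if cur == dst then some (some path.reverse)
    else
      match (PySem.Dict.ofList nh).get? cur with
      | none => none
      | some tbl =>
        match (PySem.Dict.ofList tbl).get? dst with
        | none => some none
        | some nxt => pvTraceA nh dst fuel nxt (nxt :: path)

-- inner loop of A over sorted destination keys; none = Python raises
def pvInnerA (nh : List (String × List (String × String))) (src : String)
    (costs : List (String × Int)) : List String → Option (List String)
  | [] => some []
  | dst :: rest =>
    if src == dst then pvInnerA nh src costs rest
    else
      match pvTraceA nh dst (nh.length + 2) src [src] with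
      | none => none
      | some none => pvInnerA nh src costs rest
      | some (some path) =>
        match (PySem.Dict.ofList costs).get? dst with
        | none => none
        | some cost =>
          match pvInnerA nh src costs rest with
          | none => none
          | some out =>
            some (("from " ++ src ++ " to " ++ dst ++ " cost " ++ PySem.Int.toStr cost
                   ++ " hops " ++ PySem.Str.join " -> " path) :: out)

-- outer loop of A over sorted source keys
def pvOuterA (dv : List (String × List (String × Int)))
    (nh : List (String × List (String × String))) : List String → Option (List String)
  | [] => some []
  | src :: rest =>
    match pvInnerA nh src ((PySem.Dict.ofList dv).getD src [])
        (PySem.List.sorted (PySem.Dict.keys (PySem.Dict.ofList ((PySem.Dict.ofList dv).getD src []))) (fun x => x) false) with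
    | none => none
    | some out =>
      match pvOuterA dv nh rest with
      | none => none
      | some out' => some (out ++ out')

def get_complete_paths (distance_vectors : List (String × List (String × Int))) (next_hops : List (String × List (String × String))) : String :=
  match pvOuterA distance_vectors next_hops
      (PySem.List.sorted (PySem.Dict.keys (PySem.Dict.ofList distance_vectors)) (fun x => x) false) with
  | none => ""   -- unreachable under Pre_: Python raises or diverges here
  | some lines => PySem.Str.join "\n" lines

-- ===== PORT B =====
-- B's recursive path_to (fuel = Python's recursion depth; outer none = KeyError or
-- RecursionError, both outside Pre_; inner none = no next hop for dst)
def pvPathTo (nh : List (String × List (String × String))) (dst : String) :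
    Nat → String → Option (Option (List String))
  | 0, _ => none
  | fuel+1, node =>
    if node == dst then some (some [node])
    else
      match (PySem.Dict.ofList nh).get? node with
      | none => none
      | some tbl =>
        match (PySem.Dict.ofList tbl).get? dst with
        | none => some none
        | some nxt =>
          match pvPathTo nh dst fuel nxt with
          | none => none
          | some none => some none
          | some (some tail) => some (some (node :: tail))

-- B's pairs comprehension
def pvPairsB (dv : List (String × List (String × Int))) : List (String × String) :=
  (PySem.List.sorted (PySem.Dict.keys (PySem.Dict.ofList dv)) (fun x => x) false).flatMap
    (fun s =>
      (PySem.List.sorted (PySem.Dict.keys (PySem.Dict.ofList ((PySem.Dict.ofList dv).getD s []))) (fun x => x) false).filterMap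
        (fun d => if s == d then none else some (s, d)))

-- one element of B's final generator: outer none = Python raises, inner none = path not found
def pvLineB (dv : List (String × List (String × Int)))
    (nh : List (String × List (String × String))) (sd : String × String) :
    Option (Option String) :=
  match pvPathTo nh sd.2 (nh.length + 2) sd.1 with
  | none => none
  | some none => some none
  | some (some p) =>
    match (PySem.Dict.ofList ((PySem.Dict.ofList dv).getD sd.1 [])).get? sd.2 with
    | none => none
    | some cost =>
      some (some ("from " ++ sd.1 ++ " to " ++ sd.2 ++ " cost " ++ PySem.Int.toStr cost
                  ++ " hops " ++ PySem.Str.join " -> " p))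

def get_complete_paths_alt (distance_vectors : List (String × List (String × Int))) (next_hops : List (String × List (String × String))) : String :=
  match (pvPairsB distance_vectors).mapM (pvLineB distance_vectors next_hops) with
  | none => ""   -- unreachable under Pre_
  | some ls => PySem.Str.join "\n" (ls.filterMap id)

-- ===== PRECONDITION & SPEC =====
-- one step of the next-hop chase toward dst (none = missing key or no entry for dst)
def pvHop (nh : List (String × List (String × String))) (dst : String)
    (o : Option String) : Option String :=
  o.bind (fun c => ((PySem.Dict.ofList nh).get? c).bind
    (fun tbl => (PySem.Dict.ofList tbl).get? dst))

-- Pre_ is exactly the set of inputs on which the Python A returns normally: for every (src, dst)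
-- pair it traces, some iterate of the one-step hop map within the router count reaches dst, or
-- reaches a node whose hop table exists but has no entry for dst, with every earlier iterate a
-- live non-dst node — otherwise A raises KeyError or loops forever.  It excludes nothing on
-- which A returns (a terminating chase visits pairwise-distinct keys of next_hops).
def Pre_get_complete_paths (distance_vectors : List (String × List (String × Int))) (next_hops : List (String × List (String × String))) : Prop :=
  ∀ src ∈ PySem.Dict.keys (PySem.Dict.ofList distance_vectors),
    ∀ dst ∈ PySem.Dict.keys (PySem.Dict.ofList ((PySem.Dict.ofList distance_vectors).getD src [])),
      src ≠ dst →
        ∃ k ∈ Finset.range (next_hops.length + 2),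
          (∀ j ∈ Finset.range k, (pvHop next_hops dst)^[j] (some src) ≠ none ∧
              (pvHop next_hops dst)^[j] (some src) ≠ some dst) ∧
          ((pvHop next_hops dst)^[k] (some src) = some dst ∨
            ((pvHop next_hops dst)^[k] (some src) ≠ none ∧
             (pvHop next_hops dst)^[k] (some src) ≠ some dst ∧
             ((pvHop next_hops dst)^[k] (some src)).bind
               (fun c => (PySem.Dict.ofList next_hops).get? c) ≠ none ∧
             (pvHop next_hops dst)^[k + 1] (some src) = none))
instance (distance_vectors : List (String × List (String × Int))) (next_hops : List (String × List (String × String))) : Decidable (Pre_get_complete_paths distance_vectors next_hops) := by unfold Pre_get_complete_paths; infer_instance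

def pvWitness_get_complete_paths : (List (String × List (String × Int))) × (List (String × List (String × String))) :=
  ([("b", [("a", 3), ("b", 0)]), ("a", [("b", 3)])],
   [("a", [("b", "b")]), ("b", [("a", "a")])])

def Spec_get_complete_paths (distance_vectors : List (String × List (String × Int))) (next_hops : List (String × List (String × String))) (out : String) : Prop := out = get_complete_paths_alt distance_vectors next_hops
instance (distance_vectors : List (String × List (String × Int))) (next_hops : List (String × List (String × String))) (out : String) : Decidable (Spec_get_complete_paths distance_vectors next_hops out) := by unfold Spec_get_complete_paths; infer_instance

-- ===== CLAIM (what is proved, stated in full; the proofs are below) =====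
def Claim_equal_get_complete_paths : Prop := ∀ (distance_vectors : List (String × List (String × Int))) (next_hops : List (String × List (String × String))), Dom_get_complete_paths distance_vectors next_hops → Pre_get_complete_paths distance_vectors next_hops → Spec_get_complete_paths distance_vectors next_hops (get_complete_paths distance_vectors next_hops)

-- ===== LEMMAS AND PROOFS =====

theorem pvPathTo_head {nh dst f node t} (h : pvPathTo nh dst f node = some (some t)) :
    ∃ t', t = node :: t' := by
  cases f with
  | zero => simp [pvPathTo] at h
  | succ f =>
    rw [pvPathTo] at h
    split at h
    · exact ⟨[], (Option.some.inj (Option.some.inj h)).symm⟩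
    · split at h
      · exact absurd h (by simp)
      · split at h
        · exact absurd h (by simp)
        · split at h
          · exact absurd h (by simp)
          · exact absurd h (by simp)
          · next t0 _ => exact ⟨t0, (Option.some.inj (Option.some.inj h)).symm⟩

theorem pvChain_pathTo (nh : List (String × List (String × String))) (dst : String) :
    ∀ (k f : Nat) (src : String), k < f →
      (∀ j < k, (pvHop nh dst)^[j] (some src) ≠ none ∧
          (pvHop nh dst)^[j] (some src) ≠ some dst) →
      ((pvHop nh dst)^[k] (some src) = some dst ∨
        ((pvHop nh dst)^[k] (some src) ≠ none ∧
         (pvHop nh dst)^[k] (some src) ≠ some dst ∧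
         ((pvHop nh dst)^[k] (some src)).bind
           (fun c => (PySem.Dict.ofList nh).get? c) ≠ none ∧
         (pvHop nh dst)^[k + 1] (some src) = none)) →
      ∃ r, pvPathTo nh dst f src = some r := by
  intro k
  induction k with
  | zero =>
    intro f src hf _ hstop
    obtain ⟨f, rfl⟩ : ∃ f', f = f' + 1 := ⟨f - 1, by omega⟩
    rw [pvPathTo]
    rcases hstop with hd | ⟨_, hnd, hkey, hnx⟩
    · obtain rfl : src = dst := by simpa using hd
      simp
    · have hsd : src ≠ dst := fun e => hnd (by simp [e])
      simp only [Function.iterate_zero, id] at hkey hnd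
      rw [Function.iterate_one] at hnx
      cases hn : (PySem.Dict.ofList nh).get? src with
      | none => exact absurd (by simp [hn]) hkey
      | some tbl =>
        have ht : (PySem.Dict.ofList tbl).get? dst = none := by
          simpa [pvHop, hn] using hnx
        rw [if_neg (by simpa using hsd)]
        dsimp only
        rw [ht]
        exact ⟨none, rfl⟩
  | succ k ih =>
    intro f src hf hlive hstop
    obtain ⟨f, rfl⟩ : ∃ f', f = f' + 1 := ⟨f - 1, by omega⟩
    have hsd : src ≠ dst := by
      have := (hlive 0 (by omega)).2
      simpa using this
    -- the state after one hop is not none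
    have h1 : pvHop nh dst (some src) ≠ none := by
      intro hnone
      rcases Nat.lt_or_ge 1 (k + 1) with h | h
      · exact (hlive 1 h).1 (by rw [Function.iterate_one]; exact hnone)
      · obtain rfl : k = 0 := by omega
        rcases hstop with hd | ⟨hne, _, _, _⟩
        · rw [Function.iterate_one] at hd
          rw [hd] at hnone
          exact absurd hnone (by simp)
        · exact hne (by rw [Function.iterate_one]; exact hnone)
    cases hn : (PySem.Dict.ofList nh).get? src with
    | none => exact absurd (by simp [pvHop, hn]) h1
    | some tbl =>
      cases ht : (PySem.Dict.ofList tbl).get? dst with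
      | none => exact absurd (by simp [pvHop, hn, ht]) h1
      | some nxt =>
        have hstep : pvHop nh dst (some src) = some nxt := by simp [pvHop, hn, ht]
        have hshift : ∀ j, (pvHop nh dst)^[j] (some nxt) = (pvHop nh dst)^[j + 1] (some src) := by
          intro j
          rw [Function.iterate_succ_apply, hstep]
        obtain ⟨r, hr⟩ := ih f nxt (by omega)
          (fun j hj => by rw [hshift]; exact hlive (j + 1) (by omega))
          (by rw [hshift, hshift]; exact hstop)
        rw [pvPathTo, if_neg (by simpa using hsd), hn]
        dsimp only
        rw [ht]
        dsimp only
        rw [hr]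
        cases r with
        | none => exact ⟨none, rfl⟩
        | some t => exact ⟨some (src :: t), rfl⟩

theorem pvTraceA_eq (nh : List (String × List (String × String))) (dst : String) :
    ∀ (f : Nat) (cur : String) (acc : List String),
      pvTraceA nh dst f cur acc
        = (pvPathTo nh dst f cur).map (Option.map (fun t => acc.reverse ++ t.drop 1)) := by
  intro f
  induction f with
  | zero => intro cur acc; simp [pvTraceA, pvPathTo]
  | succ f ih =>
    intro cur acc
    rw [pvTraceA, pvPathTo]
    split
    · simp
    · cases hn : (PySem.Dict.ofList nh).get? cur with
      | none => simp
      | some tbl =>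
        simp only []
        cases ht : (PySem.Dict.ofList tbl).get? dst with
        | none => simp
        | some nxt =>
          simp only []
          rw [ih]
          cases htr : pvPathTo nh dst f nxt with
          | none => simp
          | some r =>
            cases r with
            | none => simp
            | some t =>
              obtain ⟨t', rfl⟩ := pvPathTo_head htr
              simp

theorem pvMapM_append {α β : Type} (f : α → Option β) (l1 l2 : List α) {a b : List β}
    (h1 : l1.mapM f = some a) (h2 : l2.mapM f = some b) :
    (l1 ++ l2).mapM f = some (a ++ b) := by
  induction l1 generalizing a with
  | nil =>
    obtain rfl : a = [] := by simpa using h1.symm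
    simpa using h2
  | cons x xs ih =>
    rw [List.mapM_cons, Option.bind_eq_bind] at h1
    cases hx : f x with
    | none => rw [hx] at h1; simp at h1
    | some y =>
      rw [hx] at h1
      cases hxs : xs.mapM f with
      | none => rw [hxs] at h1; simp at h1
      | some ys =>
        rw [hxs] at h1
        simp at h1
        subst h1
        rw [List.cons_append, List.mapM_cons, Option.bind_eq_bind, hx]
        simp [ih hxs]

theorem pvInnerAB {dv : List (String × List (String × Int))} {nh src} :
    ∀ (dsts : List String),
      (∀ dst ∈ dsts, ((PySem.Dict.ofList ((PySem.Dict.ofList dv).getD src [])).get? dst).isSome ∧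
        (src ≠ dst → ∃ r, pvPathTo nh dst (nh.length + 2) src = some r)) →
      ∃ ls, (dsts.filterMap (fun d => if src == d then none else some (src, d))).mapM (pvLineB dv nh) = some ls ∧
        pvInnerA nh src ((PySem.Dict.ofList dv).getD src []) dsts = some (ls.filterMap id) := by
  intro dsts
  induction dsts with
  | nil => intro _; exact ⟨[], rfl, rfl⟩
  | cons dst rest ih =>
    intro hyp
    obtain ⟨hc, hs⟩ := hyp dst (by simp)
    have hyp' := fun d hd => hyp d (List.mem_cons_of_mem _ hd)
    rw [pvInnerA, List.filterMap_cons]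
    by_cases hsd : (src == dst) = true
    · rw [if_pos hsd, if_pos hsd]
      exact ih hyp'
    · rw [if_neg hsd, if_neg hsd]
      have hne : src ≠ dst := fun e => hsd (by simp [e])
      obtain ⟨r, htr⟩ := hs hne
      obtain ⟨ls, hB, hA⟩ := ih hyp'
      rw [pvTraceA_eq, htr, List.mapM_cons, Option.bind_eq_bind]
      cases r with
      | none =>
        have hline : pvLineB dv nh (src, dst) = some none := by
          unfold pvLineB; rw [htr]
        refine ⟨none :: ls, ?_, ?_⟩
        · rw [hline, hB]; rfl
        · simpa using hA
      | some t =>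
        obtain ⟨t', rfl⟩ := pvPathTo_head htr
        obtain ⟨c, hcv⟩ := Option.isSome_iff_exists.mp hc
        have hline : pvLineB dv nh (src, dst)
            = some (some ("from " ++ src ++ " to " ++ dst ++ " cost " ++ PySem.Int.toStr c
                          ++ " hops " ++ PySem.Str.join " -> " (src :: t'))) := by
          unfold pvLineB
          rw [htr]
          dsimp only
          rw [hcv]
        refine ⟨some ("from " ++ src ++ " to " ++ dst ++ " cost " ++ PySem.Int.toStr c
                      ++ " hops " ++ PySem.Str.join " -> " (src :: t')) :: ls, ?_, ?_⟩
        · rw [hline, hB]; rfl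
        · simp [hcv, hA]

theorem pvOuterAB {dv nh} :
    ∀ (srcs : List String),
      (∀ src ∈ srcs,
        ∀ dst ∈ PySem.Dict.keys (PySem.Dict.ofList ((PySem.Dict.ofList dv).getD src [])),
          src ≠ dst → ∃ r, pvPathTo nh dst (nh.length + 2) src = some r) →
      ∃ ls, (srcs.flatMap (fun s =>
          (PySem.List.sorted (PySem.Dict.keys (PySem.Dict.ofList ((PySem.Dict.ofList dv).getD s []))) (fun x => x) false).filterMap
            (fun d => if s == d then none else some (s, d)))).mapM (pvLineB dv nh) = some ls ∧
        pvOuterA dv nh srcs = some (ls.filterMap id) := by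
  intro srcs
  induction srcs with
  | nil => intro _; exact ⟨[], rfl, rfl⟩
  | cons src rest ih =>
    intro hyp
    have hsrc := hyp src (by simp)
    obtain ⟨ls2, hB2, hA2⟩ := ih (fun s hs => hyp s (List.mem_cons_of_mem _ hs))
    have hin : ∀ dst ∈ PySem.List.sorted
          (PySem.Dict.keys (PySem.Dict.ofList ((PySem.Dict.ofList dv).getD src []))) (fun x => x) false,
        ((PySem.Dict.ofList ((PySem.Dict.ofList dv).getD src [])).get? dst).isSome ∧
          (src ≠ dst → ∃ r, pvPathTo nh dst (nh.length + 2) src = some r) := by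
      intro dst hdm
      have hdk := (PySem.List.mem_sorted _ _ _ _).mp hdm
      refine ⟨?_, hsrc dst hdk⟩
      cases hq : (PySem.Dict.ofList ((PySem.Dict.ofList dv).getD src [])).get? dst with
      | none => exact absurd ((PySem.Dict.get?_eq_none_iff_not_mem_keys _ _).mp hq) (by simp [hdk])
      | some _ => rfl
    obtain ⟨ls1, hB1, hA1⟩ := pvInnerAB _ hin
    rw [pvOuterA, hA1]
    dsimp only
    rw [hA2, List.flatMap_cons]
    exact ⟨ls1 ++ ls2, pvMapM_append _ _ _ hB1 hB2, by simp⟩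

-- ===== VERDICT (by name: the statement is the Claim_ definition above) =====
theorem get_complete_paths_spec : Claim_equal_get_complete_paths := by
  intro dv nh _ hpre
  unfold Spec_get_complete_paths
  have hyp : ∀ src ∈ PySem.List.sorted (PySem.Dict.keys (PySem.Dict.ofList dv)) (fun x => x) false,
      ∀ dst ∈ PySem.Dict.keys (PySem.Dict.ofList ((PySem.Dict.ofList dv).getD src [])),
        src ≠ dst → ∃ r, pvPathTo nh dst (nh.length + 2) src = some r := by
    intro src hsm dst hdk hne
    obtain ⟨k, hk, hlive, hstop⟩ :=
      hpre src ((PySem.List.mem_sorted _ _ _ _).mp hsm) dst hdk hne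
    exact pvChain_pathTo nh dst k (nh.length + 2) src
      (by simpa using Finset.mem_range.mp hk)
      (fun j hj => hlive j (Finset.mem_range.mpr hj)) hstop
  obtain ⟨ls, hB, hA⟩ := pvOuterAB _ hyp
  unfold get_complete_paths get_complete_paths_alt pvPairsB
  rw [hA, hB]
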